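-- pv_equiv track=rewrite | github.com/thautwarm/Distributed | DConf/compile.py | parse
-- ===== SOURCE A (Python) =====
-- def removeEndl(str):
--     if not str: return str
--     if str[-1]=='\n':str=str[:-1]
--     return str
--
-- def startWith(str,begin):
--     return str[:len(begin)]==begin
--
-- def parse(codes,name):
--     status=0
--     Do=[]
--     In=[]
--     for code_line in codes:
--         code_line=removeEndl(code_line)
--         if status==0 and startWith(code_line,'Do'):
--             status=1
--         elif status==1:
--             if startWith(code_line,'In'):
--                 status=2
--             else:
--                 Do.append(code_line)
--         elif status==2:
--             In.append(code_line)
--     return "def "+name+"():\n    %s\n    %s"%('\n    '.join(Do),"return %s"%( ','.join(In)) )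
-- ===== SOURCE B (Python) =====
-- def parse(codes, name):
--     lines = [c[:-1] if c.endswith('\n') else c for c in codes]
--     body = find_body(lines)
--     Do, In = split_at_in(body) if body is not None else ([], [])
--     return "def " + name + "():\n    " + "\n    ".join(Do) + "\n    return " + ",".join(In)
--
-- def find_body(lines):
--     # lines strictly after the first 'Do'-prefixed line, or None if there is none
--     for i, l in enumerate(lines):
--         if l.startswith('Do'):
--             return lines[i + 1:]
--     return None
--
-- def split_at_in(body):
--     # (lines before the first 'In'-prefixed line, lines after it); no 'In' -> (body, [])
--     for j, m in enumerate(body):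
--         if m.startswith('In'):
--             return body[:j], body[j + 1:]
--     return body, []
-- ===== Notes on version B (the rewrite author's own statement) =====
-- stated objective: simpler
-- what changed: Replaces the running status-0/1/2 state machine with a locate-then-slice decomposition: strip newlines once, find the lines after the first 'Do'-prefixed line, then split them at the first 'In'-prefixed line.
import Mathlib
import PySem

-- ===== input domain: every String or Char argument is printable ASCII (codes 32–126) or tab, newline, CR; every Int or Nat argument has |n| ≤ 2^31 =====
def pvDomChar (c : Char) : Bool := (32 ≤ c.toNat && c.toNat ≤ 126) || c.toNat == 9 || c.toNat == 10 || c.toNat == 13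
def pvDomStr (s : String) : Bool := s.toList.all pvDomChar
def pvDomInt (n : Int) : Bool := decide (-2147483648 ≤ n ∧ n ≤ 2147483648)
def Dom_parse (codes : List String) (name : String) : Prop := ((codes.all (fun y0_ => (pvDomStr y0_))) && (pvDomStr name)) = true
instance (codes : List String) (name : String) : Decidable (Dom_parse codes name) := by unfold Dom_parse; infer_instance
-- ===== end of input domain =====

-- B replaces A's status-0/1/2 state machine with a locate-then-slice decomposition (objective: simpler); same return value.


-- ===== PORT A =====
def removeEndl (s : String) : String :=
  if s = "" then s
  else if PySem.Str.pyGet? s (-1) = some '\n' then PySem.Str.slice s none (some (-1)) else s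

def startWith (s begin_ : String) : Bool :=
  PySem.Str.slice s none (some (PySem.Str.len begin_)) == begin_

def parseLoop : List String → Nat → List String → List String → List String × List String
  | [], _, Do, In => (Do, In)
  | c :: rest, status, Do, In =>
    let l := removeEndl c
    if status == 0 && startWith l "Do" then parseLoop rest 1 Do In
    else if status == 1 then
      if startWith l "In" then parseLoop rest 2 Do In
      else parseLoop rest 1 (Do ++ [l]) In
    else if status == 2 then parseLoop rest 2 Do (In ++ [l])
    else parseLoop rest status Do In

def parse (codes : List String) (name : String) : String :=
  let p := parseLoop codes 0 [] []
  "def " ++ name ++ "():\n    " ++ PySem.Str.join "\n    " p.1 ++ "\n    " ++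
    ("return " ++ PySem.Str.join "," p.2)

-- ===== PORT B =====
def stripNl (s : String) : String :=
  if PySem.Str.endswith s "\n" then PySem.Str.slice s none (some (-1)) else s

-- lines strictly after the first 'Do'-prefixed line, or none if there is none
def findBody : List String → Option (List String)
  | [] => none
  | l :: rest => if PySem.Str.startswith l "Do" then some rest else findBody rest

-- (lines before the first 'In'-prefixed line, lines after it); no 'In' -> (body, [])
def splitAtIn : List String → List String × List String
  | [] => ([], [])
  | m :: rest =>
    if PySem.Str.startswith m "In" then ([], rest)
    else
      let p := splitAtIn rest
      (m :: p.1, p.2)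

def parse_alt (codes : List String) (name : String) : String :=
  let lines := codes.map stripNl
  let p := match findBody lines with
    | none => (([] : List String), ([] : List String))
    | some body => splitAtIn body
  "def " ++ name ++ "():\n    " ++ PySem.Str.join "\n    " p.1 ++ "\n    return " ++
    PySem.Str.join "," p.2

-- ===== PRECONDITION & SPEC =====
def Spec_parse (codes : List String) (name : String) (out : String) : Prop := out = parse_alt codes name
instance (codes : List String) (name : String) (out : String) : Decidable (Spec_parse codes name out) := by unfold Spec_parse; infer_instance

-- ===== CLAIM (what is proved, stated in full; the proofs are below) =====
def Claim_equal_parse : Prop := ∀ (codes : List String) (name : String), Dom_parse codes name → Spec_parse codes name (parse codes name)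

-- ===== LEMMAS AND PROOFS =====

theorem toList_newline : ("\n" : String).toList = ['\n'] := rfl

theorem removeEndl_eq_stripNl (s : String) : removeEndl s = stripNl s := by
  unfold removeEndl stripNl
  by_cases hs : s = ""
  · subst hs; rfl
  · have h1 : PySem.Str.pyGet? s (-1) = s.toList.getLast? := by
      simp [PySem.List.pyGet?_neg_one]
    have h2 : PySem.Str.endswith s "\n" = true ↔ s.toList.getLast? = some '\n' := by
      rw [show PySem.Str.endswith s "\n" = PySem.Chars.endswith s.toList ['\n'] by
        simp [toList_newline]]
      rw [PySem.Chars.endswith_iff s.toList ['\n']]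
      constructor
      · rintro ⟨t, ht⟩
        rw [← ht, List.getLast?_concat]
      · intro h
        rcases List.getLast?_eq_some_iff.mp h with ⟨t, ht⟩
        exact ⟨t, ht.symm⟩
    rw [if_neg hs]
    cases hE : PySem.Str.endswith s "\n" with
    | false =>
      have hne : s.toList.getLast? ≠ some '\n' := fun hc => by
        have := h2.mpr hc; rw [hE] at this; cases this
      simp [PySem.List.pyGet?_neg_one, hne]
    | true =>
      simp [PySem.List.pyGet?_neg_one, h2.mp hE]

theorem startWith_eq (s b : String) : startWith s b = PySem.Str.startswith s b := by
  unfold startWith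
  have hsl : (PySem.Str.slice s none (some (PySem.Str.len b))).toList =
      s.toList.take b.toList.length := by
    simp [PySem.List.slice_to_natCast]
  have hpre := PySem.Chars.startswith_iff s.toList b.toList
  cases hS : PySem.Str.startswith s b
  · rw [beq_eq_false_iff_ne]
    intro hc
    have hp : b.toList <+: s.toList := by
      rw [List.prefix_iff_eq_take, ← hsl, hc]
    simp [hpre.mpr hp] at hS
  · have hp : b.toList <+: s.toList := by
      have : PySem.Chars.startswith s.toList b.toList = true := by
        simpa using hS
      exact hpre.mp this
    have key : PySem.Str.slice s none (some (PySem.Str.len b)) = b := by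
      apply String.toList_inj.mp
      rw [hsl]
      exact (List.prefix_iff_eq_take.mp hp).symm
    rw [key]
    simp

theorem loop2 (codes : List String) (Do In : List String) :
    parseLoop codes 2 Do In = (Do, In ++ codes.map stripNl) := by
  induction codes generalizing In with
  | nil => simp [parseLoop]
  | cons c rest ih => simp [parseLoop, removeEndl_eq_stripNl, ih]

theorem loop1 (codes : List String) (Do In : List String) :
    parseLoop codes 1 Do In =
      (Do ++ (splitAtIn (codes.map stripNl)).1, In ++ (splitAtIn (codes.map stripNl)).2) := by
  induction codes generalizing Do with
  | nil => simp [parseLoop, splitAtIn]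
  | cons c rest ih =>
    simp only [parseLoop, removeEndl_eq_stripNl, startWith_eq, List.map_cons]
    cases hI : PySem.Chars.startswith (stripNl c).toList ['I', 'n']
    · simp [hI, ih, splitAtIn]
    · simp [hI, loop2, splitAtIn]

theorem loop0 (codes : List String) (Do In : List String) :
    parseLoop codes 0 Do In =
      match findBody (codes.map stripNl) with
      | none => (Do, In)
      | some body => (Do ++ (splitAtIn body).1, In ++ (splitAtIn body).2) := by
  induction codes with
  | nil => simp [parseLoop, findBody]
  | cons c rest ih =>
    simp only [parseLoop, removeEndl_eq_stripNl, startWith_eq, List.map_cons]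
    cases hD : PySem.Chars.startswith (stripNl c).toList ['D', 'o']
    · simp [hD, findBody, ih]
    · simp [hD, findBody, loop1]

-- ===== VERDICT (by name: the statement is the Claim_ definition above) =====
theorem parse_spec : Claim_equal_parse := by
  intro codes name _
  unfold Spec_parse parse parse_alt
  have hmerge : ∀ x : String, "\n    " ++ ("return " ++ x) = "\n    return " ++ x := by
    intro x
    rw [← String.append_assoc, show ("\n    " : String) ++ "return " = "\n    return " from rfl]
  rw [loop0 codes [] []]
  cases h : findBody (codes.map stripNl) <;>
    simp [h, String.append_assoc, hmerge]
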